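-- pv_equiv track=rewrite | github.com/Antonsoto03/Rewardbot-Polymarket | build_live_snapshot.py | choose_yes_token
-- ===== SOURCE A (Python) =====
-- def choose_yes_token(tokens):
--     if not isinstance(tokens, list):
--         return None
--     for token in tokens:
--         if isinstance(token, dict) and str(token.get("outcome", "")).lower() == "yes":
--             return token
--     for token in tokens:
--         if isinstance(token, dict):
--             return token
--     return None
-- ===== SOURCE B (Python) =====
-- def choose_yes_token(tokens):
--     if not isinstance(tokens, list):
--         return None
--     first_dict = None
--     for token in tokens:
--         if not isinstance(token, dict):
--             continue
--         if str(token.get("outcome", "")).lower() == "yes":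
--             return token
--         if first_dict is None:
--             first_dict = token
--     return first_dict
-- ===== Notes on version B (the rewrite author's own statement) =====
-- stated objective: alternative
-- what changed: Fuses A's two sequential scans into a single pass that returns the first 'yes' token immediately and remembers the first dict in an accumulator as the fallback.
import Mathlib
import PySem

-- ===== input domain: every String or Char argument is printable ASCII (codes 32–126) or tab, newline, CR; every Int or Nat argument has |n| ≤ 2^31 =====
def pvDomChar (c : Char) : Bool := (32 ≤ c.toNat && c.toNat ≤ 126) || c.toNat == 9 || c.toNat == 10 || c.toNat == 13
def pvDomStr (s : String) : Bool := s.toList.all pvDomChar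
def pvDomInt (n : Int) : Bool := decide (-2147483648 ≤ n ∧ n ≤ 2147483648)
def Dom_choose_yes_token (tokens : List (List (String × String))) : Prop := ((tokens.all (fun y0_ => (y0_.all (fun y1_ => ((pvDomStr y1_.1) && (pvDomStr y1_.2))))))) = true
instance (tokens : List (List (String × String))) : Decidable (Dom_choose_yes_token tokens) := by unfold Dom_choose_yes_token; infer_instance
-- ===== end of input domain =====

-- B fuses A's two sequential scans into one pass with a first-dict accumulator (alternative decomposition, same cost).
-- ===== PORT A =====
-- first loop of A: first token whose .get("outcome","").lower() == "yes"
def pvAYes : List (List (String × String)) → Option (List (String × String))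
  | [] => none
  | t :: rest =>
    if PySem.Str.lower ((PySem.Dict.mk t).getD "outcome" "") = "yes" then some t else pvAYes rest

-- second loop of A: first token (all tokens are dicts under the type convention)
def pvAFirst : List (List (String × String)) → Option (List (String × String))
  | [] => none
  | t :: _ => some t

def choose_yes_token (tokens : List (List (String × String))) : Option (List (String × String)) :=
  -- 'isinstance(tokens, list)' and 'isinstance(token, dict)' are always true under the type convention
  match pvAYes tokens with
  | some t => some t
  | none => pvAFirst tokens

-- ===== PORT B =====
-- single pass: return the first "yes" token immediately, remember the first dict in acc
def pvBLoop (acc : Option (List (String × String))) :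
    List (List (String × String)) → Option (List (String × String))
  | [] => acc
  | t :: rest =>
    if PySem.Str.lower ((PySem.Dict.mk t).getD "outcome" "") = "yes" then some t
    else pvBLoop (match acc with | none => some t | some a => some a) rest

def choose_yes_token_alt (tokens : List (List (String × String))) : Option (List (String × String)) :=
  pvBLoop none tokens

-- ===== PRECONDITION & SPEC =====
def Spec_choose_yes_token (tokens : List (List (String × String))) (out : Option (List (String × String))) : Prop := out = choose_yes_token_alt tokens
instance (tokens : List (List (String × String))) (out : Option (List (String × String))) : Decidable (Spec_choose_yes_token tokens out) := by unfold Spec_choose_yes_token; infer_instance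

-- ===== CLAIM =====
def Claim_equal_choose_yes_token : Prop := ∀ (tokens : List (List (String × String))), Dom_choose_yes_token tokens → Spec_choose_yes_token tokens (choose_yes_token tokens)

-- ===== LEMMAS AND PROOFS =====
theorem pvBLoop_eq (l : List (List (String × String))) :
    ∀ acc, pvBLoop acc l =
      match pvAYes l with
      | some t => some t
      | none => match acc with | some a => some a | none => pvAFirst l := by
  induction l with
  | nil => intro acc; cases acc <;> rfl
  | cons t rest ih =>
    intro acc
    by_cases h : PySem.Str.lower ((PySem.Dict.mk t).getD "outcome" "") = "yes"
    · simp [pvBLoop, pvAYes, h]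
    · cases acc <;> simp [pvBLoop, pvAYes, pvAFirst, h, ih]

-- ===== VERDICT =====
theorem choose_yes_token_spec : Claim_equal_choose_yes_token := by
  intro tokens _
  unfold Spec_choose_yes_token choose_yes_token choose_yes_token_alt
  rw [pvBLoop_eq]
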